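-- pv_equiv track=rewrite | github.com/Yningg/Cohesion_Evaluation | Visualization/Case_study.py | find_community
-- ===== SOURCE A (Python) =====
-- def find_community(results, query_nodes):
--     node_community = {}
--     for query_node in query_nodes:
--         valid_community = True
--         for algo, algo_results in results.items():
--             if query_node not in algo_results.keys():
--                 valid_community = False
--                 break
--         if valid_community:
--             node_community[query_node] = {}
--             for algo, algo_results in results.items():
--                 node_community[query_node][algo] = []
--                 for single_result in algo_results[query_node]:
--                     node_community[query_node][algo].append(single_result)
--
--     return node_community
-- ===== SOURCE B (Python) =====
-- def find_community(results, query_nodes):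
--     # Build once the set of nodes present in every algorithm's results;
--     # None means "no algorithms", in which case every query node qualifies.
--     common = None
--     for algo_results in results.values():
--         if common is None:
--             common = set(algo_results)
--         else:
--             common &= algo_results.keys()
--     node_community = {}
--     for query_node in query_nodes:
--         if common is None or query_node in common:
--             node_community[query_node] = {
--                 algo: list(algo_results[query_node])
--                 for algo, algo_results in results.items()
--             }
--     return node_community
-- ===== Notes on version B (the rewrite author's own statement) =====
-- stated objective: simpler
-- what changed: B precomputes once the intersection of all algorithms' key sets and then does a single membership-filtered pass over query_nodes building each inner dict with a comprehension, instead of A's per-node rescan of every algorithm (validity loop with break) followed by a second per-node scan with element-by-element list copying.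
import Mathlib
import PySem

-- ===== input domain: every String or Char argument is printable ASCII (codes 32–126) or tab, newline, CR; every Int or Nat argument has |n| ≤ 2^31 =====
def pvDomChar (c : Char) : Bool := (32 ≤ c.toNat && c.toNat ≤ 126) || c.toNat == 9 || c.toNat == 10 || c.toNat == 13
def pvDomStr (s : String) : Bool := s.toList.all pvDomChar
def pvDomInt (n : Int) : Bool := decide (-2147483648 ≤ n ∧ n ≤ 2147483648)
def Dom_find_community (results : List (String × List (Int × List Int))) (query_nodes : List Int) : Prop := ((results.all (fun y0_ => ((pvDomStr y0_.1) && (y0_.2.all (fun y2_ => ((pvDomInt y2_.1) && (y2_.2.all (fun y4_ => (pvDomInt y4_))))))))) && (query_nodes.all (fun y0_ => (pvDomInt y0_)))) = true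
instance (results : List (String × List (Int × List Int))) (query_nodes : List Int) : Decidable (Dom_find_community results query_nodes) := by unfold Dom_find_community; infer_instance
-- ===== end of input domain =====

-- B replaces A's per-node rescan of every algorithm by a one-time intersection of all
-- algorithms' key sets followed by a single membership-filtered pass (objective: simpler).

-- ===== PORT A =====
-- per query node: a validity scan over all algorithms, then an element-by-element copy
def find_community (results : List (String × List (Int × List Int))) (query_nodes : List Int) : List (Int × List (String × List Int)) :=
  let node_community :=
    query_nodes.foldl (fun node_community query_node =>
      -- 'for algo, algo_results in results.items(): if query_node not in algo_results.keys(): valid = False; break'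
      let valid_community := results.all (fun p => (PySem.Dict.mk p.2).contains query_node)
      if valid_community then
        node_community.insert query_node
          (results.foldl (fun inner p =>
            -- 'node_community[query_node][algo] = []' then append each single_result
            inner.insert p.1
              (((PySem.Dict.mk p.2).getD query_node []).foldl (fun acc single_result => acc ++ [single_result]) []))
            PySem.Dict.empty)
      else node_community)
      (PySem.Dict.empty : PySem.Dict Int (PySem.Dict String (List Int)))
  node_community.items.map (fun q => (q.1, q.2.items))

-- ===== PORT B =====
-- one-time intersection of all algorithms' key sets (none = no algorithms: every node passes)
def find_community_alt (results : List (String × List (Int × List Int))) (query_nodes : List Int) : List (Int × List (String × List Int)) :=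
  let common : Option (PySem.Set Int) :=
    results.foldl (fun common p =>
      match common with
      | none => some (PySem.Set.ofList (PySem.Dict.mk p.2).keys)
      | some c => some (PySem.Set.inter c (PySem.Dict.mk p.2).keys)) none
  let node_community :=
    query_nodes.foldl (fun node_community query_node =>
      if (match common with | none => true | some c => c.contains query_node) then
        node_community.insert query_node
          (PySem.Dict.ofList (results.map (fun p => (p.1, (PySem.Dict.mk p.2).getD query_node []))))
      else node_community)
      (PySem.Dict.empty : PySem.Dict Int (PySem.Dict String (List Int)))
  node_community.items.map (fun q => (q.1, q.2.items))

-- ===== PRECONDITION & SPEC =====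
def Spec_find_community (results : List (String × List (Int × List Int))) (query_nodes : List Int) (out : List (Int × List (String × List Int))) : Prop := out = find_community_alt results query_nodes
instance (results : List (String × List (Int × List Int))) (query_nodes : List Int) (out : List (Int × List (String × List Int))) : Decidable (Spec_find_community results query_nodes out) := by unfold Spec_find_community; infer_instance

-- ===== CLAIM (what is proved, stated in full; the proofs are below) =====
def Claim_equal_find_community : Prop := ∀ (results : List (String × List (Int × List Int))) (query_nodes : List Int), Dom_find_community results query_nodes → Spec_find_community results query_nodes (find_community results query_nodes)

-- ===== LEMMAS AND PROOFS =====

-- folding the Option accumulator from `some c` stays `some` and folds the sets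
theorem foldl_common_some (l : List (String × List (Int × List Int))) (c : PySem.Set Int) :
    l.foldl (fun common p =>
      match common with
      | none => some (PySem.Set.ofList (PySem.Dict.mk p.2).keys)
      | some c => some (PySem.Set.inter c (PySem.Dict.mk p.2).keys)) (some c)
    = some (l.foldl (fun c p => PySem.Set.inter c (PySem.Dict.mk p.2).keys) c) := by
  induction l generalizing c with
  | nil => rfl
  | cons p rest ih => simpa using ih _

-- membership in the folded intersection = membership in the seed and in every key set
theorem contains_foldl_inter (l : List (String × List (Int × List Int))) (c : PySem.Set Int) (qn : Int) :
    (l.foldl (fun c p => PySem.Set.inter c (PySem.Dict.mk p.2).keys) c).contains qn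
    = (c.contains qn && l.all (fun p => (PySem.Dict.mk p.2).contains qn)) := by
  induction l generalizing c with
  | nil => simp
  | cons p rest ih =>
    simp only [List.foldl_cons, List.all_cons, ih]
    have h : (PySem.Set.inter c (PySem.Dict.mk p.2).keys).contains qn
        = (c.contains qn && (PySem.Dict.mk p.2).contains qn) := by
      apply Bool.eq_iff_iff.mpr
      simp only [Bool.and_eq_true, PySem.Set.contains_iff,
        PySem.Set.mem_inter, PySem.Dict.contains_mk, List.any_eq_true, PySem.Dict.keys,
        List.mem_map, beq_iff_eq]
    rw [h]
    cases c.contains qn <;> cases (PySem.Dict.mk p.2).contains qn <;> simp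

-- A's per-node validity scan = membership test against B's precomputed intersection
theorem valid_eq_common (results : List (String × List (Int × List Int))) (qn : Int) :
    results.all (fun p => (PySem.Dict.mk p.2).contains qn)
    = (match results.foldl (fun common p =>
          match common with
          | none => some (PySem.Set.ofList (PySem.Dict.mk p.2).keys)
          | some c => some (PySem.Set.inter c (PySem.Dict.mk p.2).keys)) none with
       | none => true
       | some c => c.contains qn) := by
  cases results with
  | nil => rfl
  | cons p rest =>
    simp only [List.foldl_cons, foldl_common_some, List.all_cons, contains_foldl_inter]
    have : (PySem.Set.ofList (PySem.Dict.mk p.2).keys).contains qn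
        = (PySem.Dict.mk p.2).contains qn := by
      apply Bool.eq_iff_iff.mpr
      simp only [PySem.Set.contains_iff, PySem.Set.mem_ofList,
        PySem.Dict.contains_mk, PySem.Dict.keys, List.mem_map, List.any_eq_true, beq_iff_eq]
    rw [this]

-- A's element-by-element inner build = B's dict comprehension
theorem inner_eq (results : List (String × List (Int × List Int))) (qn : Int) :
    results.foldl (fun inner p =>
        inner.insert p.1
          (((PySem.Dict.mk p.2).getD qn []).foldl (fun acc x => acc ++ [x]) []))
      PySem.Dict.empty
    = PySem.Dict.ofList (results.map (fun p => (p.1, (PySem.Dict.mk p.2).getD qn []))) := by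
  simp only [PySem.Dict.ofList, PySem.Dict.update, List.foldl_map,
    PySem.List.foldl_append_singleton, List.nil_append]

-- ===== VERDICT (by name: the statement is the Claim_ definition above) =====
theorem find_community_spec : Claim_equal_find_community := by
  intro results query_nodes _
  unfold Spec_find_community find_community find_community_alt
  simp only [valid_eq_common, inner_eq]
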